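-- pv_equiv track=rewrite | github.com/Dizzituk/Orb | app/translation/tier0_rules.py | _is_case_sensitive_pattern
-- ===== SOURCE A (Python) =====
-- def _is_case_sensitive_pattern(pattern: str) -> bool:
--     """
--     Determine if a pattern should be case-sensitive.
--     Patterns with ALL CAPS literals are case-sensitive.
--     """
--     # Check if pattern has uppercase literals (not character classes)
--     # Simple heuristic: if pattern contains uppercase letters outside []
--     in_class = False
--     has_upper = False
--     for char in pattern:
--         if char == '[':
--             in_class = True
--         elif char == ']':
--             in_class = False
--         elif not in_class and char.isupper():
--             has_upper = True
--             break
--     return has_upper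
-- ===== SOURCE B (Python) =====
-- import re
--
-- def _is_case_sensitive_pattern(pattern: str) -> bool:
--     """
--     Determine if a pattern should be case-sensitive.
--     Patterns with ALL CAPS literals are case-sensitive.
--     """
--     # Strip every character-class region; an unclosed '[' consumes to end of string.
--     stripped = re.sub(r'\[[^\]]*(?:\]|$)', '', pattern)
--     return any(c.isupper() for c in stripped)
-- ===== Notes on version B (the rewrite author's own statement) =====
-- stated objective: idiomatic
-- what changed: Replaced A's stateful early-exit scan (in_class flag, break) by a regex re.sub stripping character-class regions (an unclosed '[' consumes to end of string) followed by any(c.isupper()).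
import Mathlib
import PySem

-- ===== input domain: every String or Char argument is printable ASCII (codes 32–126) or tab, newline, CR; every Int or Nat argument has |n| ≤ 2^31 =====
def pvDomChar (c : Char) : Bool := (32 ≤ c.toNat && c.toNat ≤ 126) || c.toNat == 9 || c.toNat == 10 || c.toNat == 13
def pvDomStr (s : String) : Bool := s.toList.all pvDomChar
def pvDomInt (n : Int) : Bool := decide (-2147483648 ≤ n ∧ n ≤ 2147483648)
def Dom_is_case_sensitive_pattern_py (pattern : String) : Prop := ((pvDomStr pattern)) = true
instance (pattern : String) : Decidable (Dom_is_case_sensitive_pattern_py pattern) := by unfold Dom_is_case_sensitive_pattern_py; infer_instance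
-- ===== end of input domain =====

-- B replaces A's single stateful early-exit scan by a regex strip of character-class
-- regions followed by any(isupper) — more idiomatic, same cost (objective: idiomatic).

-- ===== PORT A =====
-- A's for-loop with the in_class flag and the early 'break': structural recursion on
-- the character list carrying in_class; returning 'true' is the break.
def pvALoop : List Char → Bool → Bool
  | [], _ => false
  | c :: rest, inClass =>
    if c = '[' then pvALoop rest true
    else if c = ']' then pvALoop rest false
    else if !inClass && PySem.Chars.isupper c then true
    else pvALoop rest inClass

def is_case_sensitive_pattern_py (pattern : String) : Bool :=
  pvALoop pattern.toList false

-- ===== PORT B =====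
-- Hand port of re.sub(r'\[[^\]]*(?:\]|$)', '', pattern): outside a class, '[' opens a
-- region which consumes non-']' characters up to ']' or end of string; everything else
-- is kept. Exact for this fixed regex (left-to-right non-overlapping matches).
mutual
def pvStrip : List Char → List Char
  | [] => []
  | c :: rest => if c = '[' then pvSkip rest else c :: pvStrip rest
def pvSkip : List Char → List Char
  | [] => []
  | c :: rest => if c = ']' then pvStrip rest else pvSkip rest
end

def is_case_sensitive_pattern_py_alt (pattern : String) : Bool :=
  (pvStrip pattern.toList).any PySem.Chars.isupper

-- ===== PRECONDITION & SPEC =====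
def Spec_is_case_sensitive_pattern_py (pattern : String) (out : Bool) : Prop := out = is_case_sensitive_pattern_py_alt pattern
instance (pattern : String) (out : Bool) : Decidable (Spec_is_case_sensitive_pattern_py pattern out) := by unfold Spec_is_case_sensitive_pattern_py; infer_instance

-- ===== CLAIM (what is proved, stated in full; the proofs are below) =====
def Claim_equal_is_case_sensitive_pattern_py : Prop := ∀ (pattern : String), Dom_is_case_sensitive_pattern_py pattern → Spec_is_case_sensitive_pattern_py pattern (is_case_sensitive_pattern_py pattern)

-- ===== LEMMAS AND PROOFS =====
theorem pvALoop_strip (cs : List Char) :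
    pvALoop cs false = (pvStrip cs).any PySem.Chars.isupper ∧
    pvALoop cs true = (pvSkip cs).any PySem.Chars.isupper := by
  induction cs with
  | nil => simp [pvALoop, pvStrip, pvSkip]
  | cons c rest ih =>
    constructor
    · by_cases h1 : c = '['
      · simp [pvALoop, pvStrip, h1, ih.2]
      · by_cases h2 : c = ']'
        · simp [pvALoop, pvStrip, h2, show PySem.Chars.isupper ']' = false by decide, ih.1]
        · by_cases h3 : PySem.Chars.isupper c
          · simp [pvALoop, pvStrip, h1, h2, h3]
          · simp [pvALoop, pvStrip, h1, h2, h3, ih.1]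
    · by_cases h1 : c = '['
      · simp [pvALoop, pvSkip, h1, show ('[' : Char) ≠ ']' by decide, ih.2]
      · by_cases h2 : c = ']'
        · simp [pvALoop, pvSkip, h2, ih.1]
        · simp [pvALoop, pvSkip, h1, h2, ih.2]

-- ===== VERDICT (by name: the statement is the Claim_ definition above) =====
theorem is_case_sensitive_pattern_py_spec : Claim_equal_is_case_sensitive_pattern_py := by
  intro pattern _
  unfold Spec_is_case_sensitive_pattern_py is_case_sensitive_pattern_py is_case_sensitive_pattern_py_alt
  exact (pvALoop_strip pattern.toList).1
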